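-- pv_equiv track=rewrite | github.com/viveshok/codejam | PlayGame/main.py | solve
-- ===== SOURCE A (Python) =====
-- def add_score(scores, player, increment):
--     (player0, player1) = scores
--     if player == 0:
--         return (player0+increment, player1)
--     else:
--         return (player0, player1+increment)
--
-- def solve(bricks, scores, turn):
--
--     if len(bricks) <= 3:
--         remaining = sum(bricks)
--         return add_score(scores, turn, remaining)
--
--     scenarii = [0, 0, 0]
--     for i in range(3):
--         inc = sum(bricks[:i+1])
--         scenarii[i] = solve(bricks[i+1:], add_score(scores,turn,inc), 1-turn)
--
--     return max(scenarii, key=lambda x: x[turn])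
-- ===== SOURCE B (Python) =====
-- def solve(bricks, scores, turn):
--     # One reverse pass: f = optimal gain of the player to move on the current
--     # suffix (take all if <= 3 bricks remain, else suffix_sum - min of the
--     # opponent's three follow-up gains); then split the total accordingly.
--     f1 = f2 = f3 = total = 0
--     m = 0
--     for b in reversed(bricks):
--         total += b
--         m += 1
--         f0 = total if m <= 3 else total - min(f1, f2, f3)
--         f1, f2, f3 = f0, f1, f2
--     g = f1
--     if turn == 0:
--         return (scores[0] + g, scores[1] + total - g)
--     return (scores[0] + total - g, scores[1] + g)
-- ===== Notes on version B (the rewrite author's own statement) =====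
-- stated objective: faster
-- what changed: Replaces the 3-way branching recursion with a single reverse pass that keeps a running suffix sum and the last three suffix-game values (bottom-up DP), then splits the total between the players.
-- outside the precondition, e.g. on solve([1, 1, 1, 1], (0, 0), -1): A returns (0, 4), B returns (1, 3)
import Mathlib
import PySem

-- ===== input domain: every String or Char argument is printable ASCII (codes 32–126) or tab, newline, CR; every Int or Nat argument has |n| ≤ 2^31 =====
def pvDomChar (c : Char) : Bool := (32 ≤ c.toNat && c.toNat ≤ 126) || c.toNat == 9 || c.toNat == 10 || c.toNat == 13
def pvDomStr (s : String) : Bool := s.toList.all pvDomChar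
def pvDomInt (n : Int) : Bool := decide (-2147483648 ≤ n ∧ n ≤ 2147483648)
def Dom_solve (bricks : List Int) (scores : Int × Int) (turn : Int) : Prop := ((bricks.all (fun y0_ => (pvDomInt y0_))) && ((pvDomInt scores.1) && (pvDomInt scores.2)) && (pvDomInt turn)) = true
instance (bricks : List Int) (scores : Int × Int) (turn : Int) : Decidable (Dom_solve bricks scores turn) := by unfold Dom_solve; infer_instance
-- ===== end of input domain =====

-- B replaces A's 3-way branching recursion by a single O(n) reverse-pass DP over suffixes; faster (asymptotic).


-- ===== PORT A =====
def add_score (scores : Int × Int) (player : Int) (increment : Int) : Int × Int :=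
  if player = 0 then (scores.1 + increment, scores.2) else (scores.1, scores.2 + increment)

-- Python tuple index p[t] (valid t ∈ {-2,-1,0,1}; out of range raises — unreachable under Pre_, modelled as 0)
def pyPairIdx (p : Int × Int) (t : Int) : Int :=
  if t = 0 ∨ t = -2 then p.1 else if t = 1 ∨ t = -1 then p.2 else 0

-- max(scenarii, key=lambda x: x[turn]): first element with strictly greatest key
def pymax3 (t : Int) (a b c : Int × Int) : Int × Int :=
  let m := if pyPairIdx b t > pyPairIdx a t then b else a
  if pyPairIdx c t > pyPairIdx m t then c else m

-- the range(3) loop unrolled: scenarii[i] = solve(bricks[i+1:], add_score(scores,turn,sum(bricks[:i+1])), 1-turn)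
def solve (bricks : List Int) (scores : Int × Int) (turn : Int) : Int × Int :=
  if h : bricks.length ≤ 3 then
    add_score scores turn bricks.sum
  else
    let c0 := solve (bricks.drop 1) (add_score scores turn (bricks.take 1).sum) (1 - turn)
    let c1 := solve (bricks.drop 2) (add_score scores turn (bricks.take 2).sum) (1 - turn)
    let c2 := solve (bricks.drop 3) (add_score scores turn (bricks.take 3).sum) (1 - turn)
    pymax3 turn c0 c1 c2
termination_by bricks.length
decreasing_by all_goals (simp [List.length_drop]; omega)

-- ===== PORT B =====
-- the reversed(bricks) loop of Source B: state (f1, f2, f3, total, m)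
def altStep (b : Int) (st : Int × Int × Int × Int × Int) : Int × Int × Int × Int × Int :=
  let total := st.2.2.2.1 + b
  let m := st.2.2.2.2 + 1
  let f0 := if m ≤ 3 then total else total - min st.1 (min st.2.1 st.2.2.1)
  (f0, st.1, st.2.1, total, m)

def solve_alt (bricks : List Int) (scores : Int × Int) (turn : Int) : Int × Int :=
  let st := bricks.foldr altStep (0, 0, 0, 0, 0)
  let g := st.1
  let total := st.2.2.2.1
  if turn = 0 then (scores.1 + g, scores.2 + total - g)
  else (scores.1 + total - g, scores.2 + g)

-- ===== PRECONDITION & SPEC =====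
-- Pre_ excludes turn values outside {0,1} with more than 3 bricks: there A's use of turn as a
-- (possibly negative) tuple index either raises IndexError or, for turn = -1/-2 with exactly 4
-- bricks, accidentally routes the whole remaining sum to player 1 — an artefact of tuple wraparound.
def Pre_solve (bricks : List Int) (scores : Int × Int) (turn : Int) : Prop :=
  bricks.length ≤ 3 ∨ (0 ≤ turn ∧ turn ≤ 1)
instance (bricks : List Int) (scores : Int × Int) (turn : Int) : Decidable (Pre_solve bricks scores turn) := by unfold Pre_solve; infer_instance

def pvWitness_solve : List Int × (Int × Int) × Int := ([3, -1, 4, 1, 5], (0, 0), 0)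

def Spec_solve (bricks : List Int) (scores : Int × Int) (turn : Int) (out : Int × Int) : Prop := out = solve_alt bricks scores turn
instance (bricks : List Int) (scores : Int × Int) (turn : Int) (out : Int × Int) : Decidable (Spec_solve bricks scores turn out) := by unfold Spec_solve; infer_instance

-- ===== CLAIM (what is proved, stated in full; the proofs are below) =====
def Claim_equal_solve : Prop := ∀ (bricks : List Int) (scores : Int × Int) (turn : Int), Dom_solve bricks scores turn → Pre_solve bricks scores turn → Spec_solve bricks scores turn (solve bricks scores turn)

-- ===== LEMMAS AND PROOFS =====

-- the gain of the player to move on a suffix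
def F (l : List Int) : Int :=
  if h : l.length <= 3 then l.sum
  else l.sum - min (F (l.drop 1)) (min (F (l.drop 2)) (F (l.drop 3)))
termination_by l.length
decreasing_by all_goals (simp [List.length_drop]; omega)

lemma F_short (l : List Int) (h : l.length <= 3) : F l = l.sum := by
  rw [F]; simp [h]

lemma F_long (l : List Int) (h : ¬ l.length <= 3) :
    F l = l.sum - min (F (l.drop 1)) (min (F (l.drop 2)) (F (l.drop 3))) := by
  rw [F]; simp [h]

lemma fold_spec (l : List Int) :
    l.foldr altStep (0, 0, 0, 0, 0)
      = (F l, F (l.drop 1), F (l.drop 2), l.sum, (l.length : Int)) := by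
  induction l with
  | nil => simp [F_short]
  | cons b t ih =>
    simp only [List.foldr_cons, ih, altStep]
    have hd1 : (b :: t).drop 1 = t := rfl
    have hd2 : (b :: t).drop 2 = t.drop 1 := rfl
    have hd3 : (b :: t).drop 3 = t.drop 2 := rfl
    by_cases h : (b :: t).length <= 3
    · have hs : F (b :: t) = (b :: t).sum := F_short _ h
      simp only [List.length_cons] at h
      simp only [hd1, hd2, List.length_cons]
      rw [if_pos (by push_cast; omega)]
      simp only [Prod.mk.injEq]
      refine ⟨by rw [hs, List.sum_cons]; ring, trivial, trivial, by rw [List.sum_cons]; ring,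
        by push_cast; ring⟩
    · have hs := F_long (b :: t) h
      simp only [hd1, hd2, hd3] at hs
      simp only [List.length_cons] at h
      simp only [hd1, hd2, List.length_cons]
      rw [if_neg (by push_cast; omega)]
      simp only [Prod.mk.injEq]
      refine ⟨by rw [hs, List.sum_cons]; ring, trivial, trivial, by rw [List.sum_cons]; ring,
        by push_cast; ring⟩

lemma solve_alt_eq (l : List Int) (s : Int × Int) (t : Int) :
    solve_alt l s t
      = (if t = 0 then (s.1 + F l, s.2 + l.sum - F l)
         else (s.1 + l.sum - F l, s.2 + F l)) := by
  simp only [solve_alt, fold_spec]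

lemma take_drop_sum (l : List Int) (k : Nat) : (l.take k).sum + (l.drop k).sum = l.sum := by
  rw [← List.sum_append, List.take_append_drop]

-- A, on turn ∈ {0,1}, awards the mover F l and the opponent the rest
lemma solve_eq_F : ∀ n (l : List Int), l.length = n → ∀ (s : Int × Int) (t : Int), (t = 0 ∨ t = 1) →
    solve l s t = (if t = 0 then (s.1 + F l, s.2 + l.sum - F l)
                   else (s.1 + l.sum - F l, s.2 + F l)) := by
  intro n
  induction n using Nat.strong_induction_on with
  | _ n ih =>
    intro l hl s t ht
    by_cases h : l.length <= 3
    · rw [solve]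
      simp only [h, dif_pos, F_short l h, add_score]
      rcases ht with rfl | rfl
      · simp [Prod.ext_iff]
      · simp [Prod.ext_iff]
    · rw [solve]
      simp only [h, dif_neg, not_false_iff]
      have hln : 3 < l.length := by omega
      have e1 := ih (l.drop 1).length (by simp [List.length_drop]; omega) (l.drop 1) rfl
      have e2 := ih (l.drop 2).length (by simp [List.length_drop]; omega) (l.drop 2) rfl
      have e3 := ih (l.drop 3).length (by simp [List.length_drop]; omega) (l.drop 3) rfl
      have hs1 := take_drop_sum l 1
      have hs2 := take_drop_sum l 2
      have hs3 := take_drop_sum l 3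
      have hF := F_long l h
      simp only [List.drop_one] at e1 hs1 hF ⊢
      rcases ht with rfl | rfl
      · have h10 : (1 : Int) - 0 = 1 := by norm_num
        rw [h10, e1 _ 1 (Or.inr rfl), e2 _ 1 (Or.inr rfl), e3 _ 1 (Or.inr rfl)]
        simp only [add_score]
        simp only [pymax3, pyPairIdx]
        norm_num
        split_ifs <;> (simp only [Prod.mk.injEq] at *) <;> omega
      · have h11 : (1 : Int) - 1 = 0 := by norm_num
        rw [h11, e1 _ 0 (Or.inl rfl), e2 _ 0 (Or.inl rfl), e3 _ 0 (Or.inl rfl)]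
        simp only [add_score]
        simp only [pymax3, pyPairIdx]
        norm_num
        split_ifs <;> (simp only [Prod.mk.injEq] at *) <;> omega

-- ===== VERDICT (by name: the statement is the Claim_ definition above) =====
theorem solve_spec : Claim_equal_solve := by
  intro bricks scores turn _ hpre
  unfold Spec_solve
  rw [solve_alt_eq]
  by_cases ht : turn = 0 ∨ turn = 1
  · rw [solve_eq_F bricks.length bricks rfl scores turn ht]
  · -- turn outside {0,1}: Pre_ forces length <= 3; A's base case lands in add_score's else branch
    rcases hpre with h | h
    · rw [solve]
      have ht0 : turn ≠ 0 := by tauto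
      simp only [h, dif_pos, F_short bricks h, add_score, if_neg ht0, Prod.mk.injEq]
      exact ⟨by omega, trivial⟩
    · omega
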